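-- pv_equiv track=rewrite | github.com/kurlez/mdsnap | scripts/md_to_cards.py | _split_manual_pages
-- ===== SOURCE A (Python) =====
-- from typing import Dict, Iterable, Iterator, List, Optional, Sequence, Tuple
--
-- PAGE_BREAK_LINE = "---"
--
-- def _split_manual_pages(text: str) -> List[str]:
--     lines = text.splitlines()
--     pages: List[str] = []
--     current: List[str] = []
--     for line in lines:
--         if line.strip() == PAGE_BREAK_LINE:
--             page = "\n".join(current).strip()
--             if page:
--                 pages.append(page)
--             current = []
--         else:
--             current.append(line)
--     final_page = "\n".join(current).strip()
--     if final_page: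
--         pages.append(final_page)
--     return pages
-- ===== SOURCE B (Python) =====
-- PAGE_BREAK_LINE = "---"
--
-- def _split_manual_pages(text):
--     lines = text.splitlines()
--     pages = []
--     n = len(lines)
--     i = 0
--     while i < n:
--         if lines[i].strip() == PAGE_BREAK_LINE:
--             i += 1
--         else:
--             j = i + 1
--             while j < n and lines[j].strip() != PAGE_BREAK_LINE:
--                 j += 1
--             page = "\n".join(lines[i:j]).strip()
--             if page:
--                 pages.append(page)
--             i = j
--     return pages
-- ===== Notes on version B (the rewrite author's own statement) =====
-- stated objective: alternative
-- what changed: Replaces the line-by-line accumulator buffer and post-loop final-flush with a two-pointer run scanner that skips break lines and grabs each maximal non-break run as a slice, with a single emit site.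
import Mathlib
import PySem

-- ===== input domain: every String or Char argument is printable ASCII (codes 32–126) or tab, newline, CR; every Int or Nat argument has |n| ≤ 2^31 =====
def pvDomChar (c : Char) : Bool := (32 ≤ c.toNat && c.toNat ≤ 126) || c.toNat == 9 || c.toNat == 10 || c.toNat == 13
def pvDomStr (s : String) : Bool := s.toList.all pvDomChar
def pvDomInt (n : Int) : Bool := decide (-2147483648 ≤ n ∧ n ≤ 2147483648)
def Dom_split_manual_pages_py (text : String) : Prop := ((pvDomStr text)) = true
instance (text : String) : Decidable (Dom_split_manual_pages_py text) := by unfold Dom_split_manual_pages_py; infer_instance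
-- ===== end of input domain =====

-- B replaces A's accumulator buffer + final flush with a two-pointer run scanner (alternative decomposition, same cost); return values proved equal on all inputs.

-- ===== PORT A =====
def split_manual_pages_py (text : String) : List String :=
  let lines := PySem.Str.splitlines text
  let st := lines.foldl
    (fun (st : List String × List String) line =>
      if PySem.Str.strip line == "---" then
        let page := PySem.Str.strip (PySem.Str.join "\n" st.2)
        (if page == "" then st.1 else st.1 ++ [page], [])
      else
        (st.1, st.2 ++ [line]))
    ([], [])
  let finalPage := PySem.Str.strip (PySem.Str.join "\n" st.2)
  if finalPage == "" then st.1 else st.1 ++ [finalPage]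

-- ===== PORT B =====
-- line.strip() == PAGE_BREAK_LINE
def pvIsBreak (line : String) : Bool := PySem.Str.strip line == "---"

-- the join-strip-and-append-if-nonempty step of B
def pvEmit (run : List String) : List String :=
  let page := PySem.Str.strip (PySem.Str.join "\n" run)
  if page == "" then [] else [page]

-- B's outer while loop: skip a break line, or take the maximal non-break run lines[i:j] and emit it
def pvAltGo : List String → List String
  | [] => []
  | l :: ls =>
    if pvIsBreak l then pvAltGo ls
    else
      pvEmit (l :: ls.takeWhile (fun x => !pvIsBreak x)) ++
        pvAltGo (ls.dropWhile (fun x => !pvIsBreak x))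
termination_by lines => lines.length
decreasing_by
  · simp
  · simpa using Nat.lt_succ_of_le (List.length_dropWhile_le _ ls)

def split_manual_pages_py_alt (text : String) : List String :=
  pvAltGo (PySem.Str.splitlines text)

-- ===== PRECONDITION & SPEC =====
def Spec_split_manual_pages_py (text : String) (out : List String) : Prop := out = split_manual_pages_py_alt text
instance (text : String) (out : List String) : Decidable (Spec_split_manual_pages_py text out) := by unfold Spec_split_manual_pages_py; infer_instance

-- ===== CLAIM (what is proved, stated in full; the proofs are below) =====
def Claim_equal_split_manual_pages_py : Prop := ∀ (text : String), Dom_split_manual_pages_py text → Spec_split_manual_pages_py text (split_manual_pages_py text)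

-- ===== LEMMAS AND PROOFS =====

-- proof-side recursive reading of A's loop: pending buffer cur, remaining lines
def pvG (cur : List String) : List String → List String
  | [] => pvEmit cur
  | l :: ls => if pvIsBreak l then pvEmit cur ++ pvG [] ls else pvG (cur ++ [l]) ls

theorem pvEmit_nil : pvEmit [] = [] := rfl

theorem pvA_loop (lines : List String) : ∀ (pages cur : List String),
    (let st := lines.foldl
      (fun (st : List String × List String) line =>
        if PySem.Str.strip line == "---" then
          let page := PySem.Str.strip (PySem.Str.join "\n" st.2)
          (if page == "" then st.1 else st.1 ++ [page], [])
        else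
          (st.1, st.2 ++ [line]))
      (pages, cur)
     let finalPage := PySem.Str.strip (PySem.Str.join "\n" st.2)
     if finalPage == "" then st.1 else st.1 ++ [finalPage])
    = pages ++ pvG cur lines := by
  induction lines with
  | nil =>
    intro pages cur
    simp only [List.foldl_nil, pvG, pvEmit]
    by_cases h : PySem.Str.strip (PySem.Str.join "\n" cur) = ""
    · simp [h]
    · simp [h]
  | cons l ls ih =>
    intro pages cur
    simp only [List.foldl_cons, pvG, pvIsBreak]
    by_cases hb : PySem.Str.strip l == "---"
    · simp only [hb, pvEmit]
      by_cases h : PySem.Str.strip (PySem.Str.join "\n" cur) = ""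
      · simpa [h] using ih (pages) []
      · simpa [h, List.append_assoc] using ih (pages ++ [PySem.Str.strip (PySem.Str.join "\n" cur)]) []
    · simp only [hb]
      simpa [hb] using ih pages (cur ++ [l])

theorem pvG_shift (lines : List String) : ∀ (cur : List String),
    pvG cur lines =
      pvEmit (cur ++ lines.takeWhile (fun x => !pvIsBreak x)) ++
        pvG [] ((lines.dropWhile (fun x => !pvIsBreak x)).drop 1) := by
  induction lines with
  | nil => intro cur; simp [pvG, pvEmit_nil]
  | cons l ls ih =>
    intro cur
    by_cases hb : pvIsBreak l
    · simp [pvG, hb]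
    · simp only [pvG, hb, if_neg, List.takeWhile_cons, List.dropWhile_cons, Bool.not_eq_true]
      simp only [Bool.not_false, if_pos]
      rw [ih (cur ++ [l])]
      simp [List.append_assoc]

theorem pvG_eq_alt (lines : List String) : pvG [] lines = pvAltGo lines := by
  induction lines using pvAltGo.induct with
  | case1 => simp [pvG, pvAltGo, pvEmit_nil]
  | case2 l ls hb ih =>
    rw [pvAltGo, if_pos hb, ← ih]
    simp [pvG, hb, pvEmit_nil]
  | case3 l ls hb ih =>
    rw [pvAltGo, if_neg hb, pvG_shift]
    simp only [List.takeWhile_cons, List.dropWhile_cons, hb, Bool.not_false, if_true,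
      List.nil_append]
    congr 1
    rcases hrest : ls.dropWhile (fun x => !pvIsBreak x) with _ | ⟨b, rest'⟩
    · simp [pvG, pvAltGo, pvEmit_nil]
    · have hbb : pvIsBreak b := by
        have := List.head_dropWhile_not (fun x => !pvIsBreak x) (l := ls)
        simp [hrest] at this
        exact this
      rw [hrest] at ih
      rw [← ih]
      simp only [List.drop_succ_cons, List.drop_zero, pvG, hbb, if_true, pvEmit_nil,
        List.nil_append]

-- ===== VERDICT (by name: the statement is the Claim_ definition above) =====
theorem split_manual_pages_py_spec : Claim_equal_split_manual_pages_py := by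
  intro text _
  show split_manual_pages_py text = split_manual_pages_py_alt text
  unfold split_manual_pages_py split_manual_pages_py_alt
  rw [pvA_loop (PySem.Str.splitlines text) [] []]
  simp [pvG_eq_alt]
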